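-- pv_equiv track=rewrite | github.com/aakarshakarora/json_py | seeAlso_function.py | addFx
-- ===== SOURCE A (Python) =====
-- def addFx(element):
--     str = ""
--     for value in element:
--         if value == "*" or value == "[":
--             continue
--         elif value != " ":
--             str += value
--         else:
--             break
--
--     return str
-- ===== SOURCE B (Python) =====
-- def addFx(element):
--     i = element.find(" ")
--     head = element if i == -1 else element[:i]
--     return "".join(c for c in head if c != "*" and c != "[")
-- ===== Notes on version B (the rewrite author's own statement) =====
-- stated objective: idiomatic
-- what changed: B first extracts the prefix before the first space (str.find plus a slice) and then drops the asterisk and opening-bracket characters with a join over a filtering comprehension, instead of A's single character loop with continue/break and string accumulation.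
import Mathlib
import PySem

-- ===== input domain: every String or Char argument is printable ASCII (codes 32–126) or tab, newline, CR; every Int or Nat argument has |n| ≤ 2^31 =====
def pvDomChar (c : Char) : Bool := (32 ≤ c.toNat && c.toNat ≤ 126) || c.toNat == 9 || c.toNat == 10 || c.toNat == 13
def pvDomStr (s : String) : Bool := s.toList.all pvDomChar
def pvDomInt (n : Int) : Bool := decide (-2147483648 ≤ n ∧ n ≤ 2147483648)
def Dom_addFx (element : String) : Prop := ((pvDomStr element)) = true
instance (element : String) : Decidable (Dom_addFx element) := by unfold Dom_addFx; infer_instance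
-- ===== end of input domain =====

-- B takes the prefix before the first space via find+slice and then drops the two excluded
-- characters in a comprehension, instead of A's single accumulator loop with continue/break (idiomatic, same cost).

-- ===== PORT A =====
-- A: accumulator loop; skip excluded characters, append others, break at the first space
def addFxGo (acc : String) : List Char → String
  | [] => acc
  | c :: rest =>
    if c == '*' || c == '[' then addFxGo acc rest
    else if c != ' ' then addFxGo (acc.push c) rest
    else acc

def addFx (element : String) : String := addFxGo "" element.toList

-- ===== PORT B =====
def addFx_alt (element : String) : String :=
  let i := PySem.Str.find element " "
  let head := if i = -1 then element else PySem.Str.slice element none (some i)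
  String.ofList (head.toList.filter (fun c => c != '*' && c != '['))

-- ===== PRECONDITION & SPEC =====
def Spec_addFx (element : String) (out : String) : Prop := out = addFx_alt element
instance (element : String) (out : String) : Decidable (Spec_addFx element out) := by unfold Spec_addFx; infer_instance

-- ===== CLAIM (what is proved, stated in full; the proofs are below) =====
def Claim_equal_addFx : Prop := ∀ (element : String), Dom_addFx element → Spec_addFx element (addFx element)

-- ===== LEMMAS AND PROOFS =====
lemma singleton_prefix_iff (c : Char) (xs : List Char) : [c] <+: xs ↔ xs.head? = some c := by
  cases xs with
  | nil => simp
  | cons a as => simp [List.cons_prefix_cons, eq_comm]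

-- A's loop returns the pre-space prefix with the excluded characters filtered out
lemma addFxGo_eq (l : List Char) (acc : String) :
    addFxGo acc l =
      acc ++ String.ofList ((l.takeWhile (fun c => c != ' ')).filter (fun c => c != '*' && c != '[')) := by
  induction l generalizing acc with
  | nil => simp [addFxGo]
  | cons c rest ih =>
    by_cases h1 : (c == '*' || c == '[') = true
    · have hc : (c != ' ') = true := by
        simp only [Bool.or_eq_true, beq_iff_eq] at h1
        rcases h1 with h | h <;> subst h <;> decide
      have hA : (c != '*' && c != '[') = false := by
        simp only [Bool.or_eq_true, beq_iff_eq] at h1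
        rcases h1 with h | h <;> subst h <;> decide
      simp only [addFxGo, h1, if_pos, ih, List.takeWhile_cons, hc, if_pos, List.filter_cons, hA,
        Bool.false_eq_true, ite_false]
    · simp only [addFxGo, h1]
      rw [if_neg (by simp_all)]
      by_cases h2 : (c != ' ') = true
      · rw [if_pos h2, ih, List.takeWhile_cons, if_pos h2, List.filter_cons]
        have hA : (c != '*' && c != '[') = true := by
          simp only [Bool.or_eq_true, beq_iff_eq, not_or] at h1
          simp [h1.1, h1.2]
        rw [hA, if_pos rfl]
        apply String.ext; simp
      · rw [if_neg h2, List.takeWhile_cons, if_neg h2]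
        apply String.ext; simp

-- if the first space is at index n, the pre-space prefix is take n
lemma takeWhile_of_find (l : List Char) (n : Nat)
    (h1 : ∀ j, j < n → ¬ [' '] <+: l.drop j) (h2 : [' '] <+: l.drop n) :
    l.takeWhile (fun c => c != ' ') = l.take n := by
  induction l generalizing n with
  | nil => simp at h2
  | cons c rest ih =>
    cases n with
    | zero =>
      rw [singleton_prefix_iff] at h2
      simp at h2
      simp [h2]
    | succ m =>
      have hc : c ≠ ' ' := by
        intro hcc
        exact h1 0 (Nat.succ_pos m) ((singleton_prefix_iff _ _).mpr (by simp [hcc]))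
      rw [List.takeWhile_cons, if_pos (by simp [hc]), List.take_succ_cons]
      congr 1
      exact ih m (fun j hj => h1 (j+1) (by omega)) h2

-- B's head (find + slice, or the whole string when no space) is the pre-space prefix
lemma head_eq (element : String) :
    (if PySem.Str.find element " " = -1 then element
     else PySem.Str.slice element none (some (PySem.Str.find element " "))).toList
      = element.toList.takeWhile (fun c => c != ' ') := by
  have hfind : PySem.Str.find element " " = PySem.Chars.find element.toList [' '] := by
    simp [PySem.Str.find_eq]
  by_cases h : PySem.Str.find element " " = -1
  · rw [if_pos h]
    have h' : ¬ ([' '] <:+: element.toList) := by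
      rw [← PySem.Chars.find_eq_neg_one_iff, ← hfind]
      exact h
    rw [List.takeWhile_eq_self_iff.mpr]
    intro a ha
    simp only [bne_iff_ne, ne_eq]
    intro haa
    apply h'
    subst haa
    obtain ⟨s, t, hst⟩ := List.append_of_mem ha
    exact ⟨s, t, by simp [hst]⟩
  · rw [if_neg h]
    have h0 : PySem.Chars.findFrom element.toList [' '] ((0 : Nat) : Int) = PySem.Chars.find element.toList [' '] := by
      simpa using PySem.Chars.findFrom_zero element.toList [' ']
    have hne : PySem.Chars.findFrom element.toList [' '] ((0 : Nat) : Int) ≠ -1 := by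
      rw [h0, ← hfind]; exact h
    obtain ⟨hge, hpre, hmin⟩ :=
      PySem.Chars.findFrom_natCast_spec element.toList [' '] 0 (Nat.zero_le _) hne
    rw [h0, ← hfind] at hge hpre hmin
    have hnn : 0 ≤ PySem.Str.find element " " := by exact_mod_cast hge
    rw [PySem.Str.toList_slice, PySem.Chars.slice_eq_listSlice,
        PySem.List.slice_to element.toList hnn]
    exact (takeWhile_of_find element.toList _ (fun j hj => hmin j (Nat.zero_le j) hj) hpre).symm

-- ===== VERDICT (by name: the statement is the Claim_ definition above) =====
theorem addFx_spec : Claim_equal_addFx := by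
  intro element _
  unfold Spec_addFx
  rw [addFx, addFxGo_eq, addFx_alt]
  simp only [head_eq]
  apply String.ext
  simp
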